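-- pv_equiv track=rewrite | github.com/gevaertlab/DUNE | aspects/0_MRI/versions_bryce/brainAE.py | computeOuterLinDim
-- ===== SOURCE A (Python) =====
-- def computeOuterLinDim(batchSize,slicePad,convLayerCount,minImageDims,convChannels,convKernelSizes):
--     height = minImageDims[0]
--     width = minImageDims[1]
--     depth = 2*slicePad+1
--     channels = convChannels[0]
--
--     for i in range(0,convLayerCount):
--         depth = (depth - convKernelSizes[2])+1
--         height = (height - convKernelSizes[0])+1
--         width = (width - convKernelSizes[1])+1
--         channels = convChannels[i+1]
--     return depth*height*width*channels
-- ===== SOURCE B (Python) =====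
-- def computeOuterLinDim(batchSize, slicePad, convLayerCount, minImageDims, convChannels, convKernelSizes):
--     depth = 2 * slicePad + 1 - convLayerCount * (convKernelSizes[2] - 1)
--     height = minImageDims[0] - convLayerCount * (convKernelSizes[0] - 1)
--     width = minImageDims[1] - convLayerCount * (convKernelSizes[1] - 1)
--     return depth * height * width * convChannels[convLayerCount]
-- ===== Notes on version B (the rewrite author's own statement) =====
-- stated objective: simpler
-- what changed: Replaced the per-layer shrink loop by a direct closed form (each layer shrinks every spatial dimension by kernel-1, channels is read once at index convLayerCount); Pre_ restricts to the natural domain: convLayerCount >= 0 (A silently ignores negative counts, B's negative index wraps) and a full 3-entry kernel-size list (with zero layers A never reads it, B's closed form does).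
-- outside the precondition, e.g. on computeOuterLinDim(1, 1, 0, [5, 5], [2], []): A returns 150, B raises IndexError; on computeOuterLinDim(1, 1, -1, [5, 5], [2, 3], [3, 3, 3]): A returns 150, B returns 735
import Mathlib
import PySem

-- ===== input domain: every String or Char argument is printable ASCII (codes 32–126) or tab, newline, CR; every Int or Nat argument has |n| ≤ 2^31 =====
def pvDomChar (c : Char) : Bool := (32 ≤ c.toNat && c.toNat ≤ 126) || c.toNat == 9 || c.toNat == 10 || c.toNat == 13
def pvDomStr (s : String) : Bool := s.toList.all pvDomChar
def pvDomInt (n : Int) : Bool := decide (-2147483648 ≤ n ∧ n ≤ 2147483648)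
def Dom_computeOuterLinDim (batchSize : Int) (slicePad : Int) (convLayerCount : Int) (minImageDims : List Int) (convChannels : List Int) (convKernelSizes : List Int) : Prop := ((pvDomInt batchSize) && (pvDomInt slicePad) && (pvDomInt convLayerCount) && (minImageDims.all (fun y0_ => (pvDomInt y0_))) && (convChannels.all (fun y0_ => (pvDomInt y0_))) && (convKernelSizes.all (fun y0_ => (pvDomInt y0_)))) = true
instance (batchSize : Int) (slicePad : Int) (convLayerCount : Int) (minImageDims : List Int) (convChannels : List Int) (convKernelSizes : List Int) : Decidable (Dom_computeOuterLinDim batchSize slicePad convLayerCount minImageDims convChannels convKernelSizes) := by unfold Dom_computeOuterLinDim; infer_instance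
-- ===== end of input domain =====

-- B replaces the per-layer shrink loop by an O(1) closed form (simpler).
-- ===== PORT A =====
def computeOuterLinDim (batchSize : Int) (slicePad : Int) (convLayerCount : Int) (minImageDims : List Int) (convChannels : List Int) (convKernelSizes : List Int) : Int :=
  -- literal port of A; list indexing via pyGetD, exact under Pre_ (all indices in range)
  let height := PySem.List.pyGetD minImageDims 0 0
  let width := PySem.List.pyGetD minImageDims 1 0
  let depth := 2 * slicePad + 1
  let channels := PySem.List.pyGetD convChannels 0 0
  let s := (PySem.List.pyRange 0 convLayerCount 1).foldl
    (fun (st : Int × Int × Int × Int) i =>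
      (st.1 - PySem.List.pyGetD convKernelSizes 2 0 + 1,
       st.2.1 - PySem.List.pyGetD convKernelSizes 0 0 + 1,
       st.2.2.1 - PySem.List.pyGetD convKernelSizes 1 0 + 1,
       PySem.List.pyGetD convChannels (i + 1) 0))
    (depth, height, width, channels)
  s.1 * s.2.1 * s.2.2.1 * s.2.2.2

-- ===== PORT B =====
def computeOuterLinDim_alt (batchSize : Int) (slicePad : Int) (convLayerCount : Int) (minImageDims : List Int) (convChannels : List Int) (convKernelSizes : List Int) : Int :=
  -- literal port of B (closed form); indexing via pyGetD, exact under Pre_ (all indices in range)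
  let depth := 2 * slicePad + 1 - convLayerCount * (PySem.List.pyGetD convKernelSizes 2 0 - 1)
  let height := PySem.List.pyGetD minImageDims 0 0 - convLayerCount * (PySem.List.pyGetD convKernelSizes 0 0 - 1)
  let width := PySem.List.pyGetD minImageDims 1 0 - convLayerCount * (PySem.List.pyGetD convKernelSizes 1 0 - 1)
  depth * height * width * PySem.List.pyGetD convChannels convLayerCount 0

-- ===== PRECONDITION & SPEC =====
-- Pre_ is the natural domain of the task: a nonnegative layer count (A silently ignores a
-- negative one while B's negative index wraps — an accident nobody would specify), the two
-- spatial dims, all channel entries 0..convLayerCount, and the full 3-entry kernel-size list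
-- (when convLayerCount = 0 A happens never to read it while B's closed form does).
def Pre_computeOuterLinDim (batchSize : Int) (slicePad : Int) (convLayerCount : Int) (minImageDims : List Int) (convChannels : List Int) (convKernelSizes : List Int) : Prop :=
  0 ≤ convLayerCount ∧ 2 ≤ minImageDims.length ∧
    convLayerCount.toNat < convChannels.length ∧ 3 ≤ convKernelSizes.length
instance (batchSize : Int) (slicePad : Int) (convLayerCount : Int) (minImageDims : List Int) (convChannels : List Int) (convKernelSizes : List Int) : Decidable (Pre_computeOuterLinDim batchSize slicePad convLayerCount minImageDims convChannels convKernelSizes) := by unfold Pre_computeOuterLinDim; infer_instance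
def pvWitness_computeOuterLinDim : Int × Int × Int × List Int × List Int × List Int := (1, 2, 2, [10, 12], [1, 8, 16], [3, 3, 3])

def Spec_computeOuterLinDim (batchSize : Int) (slicePad : Int) (convLayerCount : Int) (minImageDims : List Int) (convChannels : List Int) (convKernelSizes : List Int) (out : Int) : Prop := out = computeOuterLinDim_alt batchSize slicePad convLayerCount minImageDims convChannels convKernelSizes
instance (batchSize : Int) (slicePad : Int) (convLayerCount : Int) (minImageDims : List Int) (convChannels : List Int) (convKernelSizes : List Int) (out : Int) : Decidable (Spec_computeOuterLinDim batchSize slicePad convLayerCount minImageDims convChannels convKernelSizes out) := by unfold Spec_computeOuterLinDim; infer_instance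

-- ===== CLAIM (what is proved, stated in full; the proofs are below) =====
def Claim_equal_computeOuterLinDim : Prop := ∀ (batchSize : Int) (slicePad : Int) (convLayerCount : Int) (minImageDims : List Int) (convChannels : List Int) (convKernelSizes : List Int), Dom_computeOuterLinDim batchSize slicePad convLayerCount minImageDims convChannels convKernelSizes → Pre_computeOuterLinDim batchSize slicePad convLayerCount minImageDims convChannels convKernelSizes → Spec_computeOuterLinDim batchSize slicePad convLayerCount minImageDims convChannels convKernelSizes (computeOuterLinDim batchSize slicePad convLayerCount minImageDims convChannels convKernelSizes)

-- ===== LEMMAS AND PROOFS =====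

-- loop characterisation: folding A's body over range(0,n) yields the closed form
theorem foldA_eq (convChannels convKernelSizes : List Int) (n : Nat) (d h w c : Int) :
    (PySem.List.pyRange 0 (n : Int) 1).foldl
      (fun (st : Int × Int × Int × Int) i =>
        (st.1 - PySem.List.pyGetD convKernelSizes 2 0 + 1,
         st.2.1 - PySem.List.pyGetD convKernelSizes 0 0 + 1,
         st.2.2.1 - PySem.List.pyGetD convKernelSizes 1 0 + 1,
         PySem.List.pyGetD convChannels (i + 1) 0))
      (d, h, w, c)
    = (d - n * (PySem.List.pyGetD convKernelSizes 2 0 - 1),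
       h - n * (PySem.List.pyGetD convKernelSizes 0 0 - 1),
       w - n * (PySem.List.pyGetD convKernelSizes 1 0 - 1),
       if n = 0 then c else PySem.List.pyGetD convChannels (n : Int) 0) := by
  induction n with
  | zero => simp [PySem.List.pyRange_one_eq_nil]
  | succ m ih =>
      rw [show ((m + 1 : Nat) : Int) = (m : Int) + 1 by push_cast; ring,
        PySem.List.pyRange_one_succ_right (by positivity), List.foldl_append, ih]
      simp only [List.foldl_cons, List.foldl_nil]
      refine Prod.ext ?_ (Prod.ext ?_ (Prod.ext ?_ ?_)) <;> simp <;> try ring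

-- ===== VERDICT (by name: the statement is the Claim_ definition above) =====
theorem computeOuterLinDim_spec : Claim_equal_computeOuterLinDim := by
  intro bs sp n mid cc ks _ hpre
  obtain ⟨hn, -, -, -⟩ := hpre
  unfold Spec_computeOuterLinDim computeOuterLinDim computeOuterLinDim_alt
  dsimp only
  rw [show n = ((n.toNat : Nat) : Int) by omega, foldA_eq]
  by_cases h0 : n.toNat = 0
  · simp [h0]
  · simp only [h0, if_false]
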